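-- pv_equiv track=rewrite | github.com/LRidelle/LINGE1225-Algorithmique-et-Programmation-en-Economie-et-Gestion | TP05.py | cumul
-- ===== SOURCE A (Python) =====
-- def cumul(mandats):
--     l = []
--     lst = []
--     for v in mandats.values():
--         lst += v
--     for n in lst:
--         if lst.count(n) > 1 and n not in l:
--             l.append(n)
--     return l
-- ===== SOURCE B (Python) =====
-- def cumul(mandats):
--     lst = []
--     for v in mandats.values():
--         lst += v
--     out = []
--     # peel off one distinct head at a time: h is a duplicate iff it survives
--     # in the tail; then delete every occurrence of h and continue on the rest
--     while lst:
--         h, t = lst[0], lst[1:]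
--         rest = [x for x in t if x != h]
--         if len(rest) < len(t):
--             out.append(h)
--         lst = rest
--     return out
-- ===== Notes on version B (the rewrite author's own statement) =====
-- stated objective: faster
-- what changed: Instead of counting occurrences of every element and filtering with an 'n not in l' membership test, B peels the flattened list head by head: it decides duplication of the head by whether deleting all its later occurrences shrinks the tail, then loops on the list with that value entirely removed, so it does one O(n) pass per distinct value instead of one per element.
import Mathlib
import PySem

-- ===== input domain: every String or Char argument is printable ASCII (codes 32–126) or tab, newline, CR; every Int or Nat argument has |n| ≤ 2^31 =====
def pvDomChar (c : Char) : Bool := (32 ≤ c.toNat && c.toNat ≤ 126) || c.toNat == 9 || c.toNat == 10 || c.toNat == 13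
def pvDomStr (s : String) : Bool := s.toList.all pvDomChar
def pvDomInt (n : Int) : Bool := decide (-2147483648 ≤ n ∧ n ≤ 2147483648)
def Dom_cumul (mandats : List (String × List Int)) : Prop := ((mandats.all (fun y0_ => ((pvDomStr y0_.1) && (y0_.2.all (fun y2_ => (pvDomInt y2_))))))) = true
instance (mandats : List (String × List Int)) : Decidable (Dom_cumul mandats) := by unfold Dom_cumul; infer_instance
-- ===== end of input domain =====

-- B replaces A's count()/membership rescans with a head-peeling loop: decide duplication of the
-- head by whether deleting its later occurrences shrinks the tail, then continue on the shrunken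
-- list (objective: alternative — no counter, no output-membership test).

-- ===== PORT A =====
def cumul (mandats : List (String × List Int)) : List Int :=
  let lst := (PySem.Dict.ofList mandats).values.foldl (fun acc v => acc ++ v) []
  lst.foldl (fun l n => if decide (PySem.List.count lst n > 1) && !(l.contains n) then l ++ [n] else l) []

-- ===== PORT B =====
-- B's while loop: each iteration peels one distinct head value off lst.
def cumulPeel (lst : List Int) : List Int :=
  match lst with
  | [] => []
  | hd :: t =>
    let rest := t.filter (fun x => !(x == hd))
    if rest.length < t.length then hd :: cumulPeel rest else cumulPeel rest
  termination_by lst.length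
  decreasing_by all_goals
    simp only [List.length_unattach]
    exact Nat.lt_succ_of_le (le_trans (List.length_filter_le _ _) (by simp))



def cumul_alt (mandats : List (String × List Int)) : List Int :=
  let lst := (PySem.Dict.ofList mandats).values.foldl (fun acc v => acc ++ v) []
  cumulPeel lst

-- ===== PRECONDITION & SPEC =====
def Spec_cumul (mandats : List (String × List Int)) (out : List Int) : Prop := out = cumul_alt mandats
instance (mandats : List (String × List Int)) (out : List Int) : Decidable (Spec_cumul mandats out) := by unfold Spec_cumul; infer_instance

-- ===== CLAIM (what is proved, stated in full; the proofs are below) =====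
def Claim_equal_cumul : Prop := ∀ (mandats : List (String × List Int)), Dom_cumul mandats → Spec_cumul mandats (cumul mandats)

-- ===== LEMMAS AND PROOFS =====

-- A's conditional-append loop is 'Set.add' folded over the filtered list.
theorem foldA_eq_foldl_add (p : Int → Bool) (xs acc : List Int) :
    xs.foldl (fun l n => if p n && !(l.contains n) then l ++ [n] else l) acc
      = (xs.filter p).foldl PySem.Set.add acc := by
  induction xs generalizing acc with
  | nil => rfl
  | cons x xs ih =>
    rw [List.foldl_cons, List.filter_cons]
    by_cases hp : p x = true
    · rw [if_pos hp, List.foldl_cons, ← ih]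
      congr 1
      simp only [PySem.Set.add, PySem.Set.contains, hp, Bool.true_and]
      by_cases hc : x ∈ acc <;> simp [hc]
    · rw [show (if (p x && !(List.contains acc x)) = true then acc ++ [x] else acc) = acc from by
        simp [hp]]
      rw [if_neg hp]
      exact ih acc

-- ordered dedup commutes with filter.
theorem ofList_filter (p : Int → Bool) (xs : List Int) :
    PySem.Set.ofList (xs.filter p) = (PySem.Set.ofList xs).filter p := by
  induction xs with
  | nil => rfl
  | cons x xs ih =>
    rw [List.filter_cons]
    by_cases hp : p x = true
    · rw [if_pos hp, PySem.Set.ofList_cons, PySem.Set.ofList_cons, ih]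
      simp only [PySem.Set.discard, List.filter_cons, hp, if_pos, List.filter_filter]
      congr 1
      apply List.filter_congr
      intro y _
      rw [Bool.and_comm]
    · rw [if_neg (by simp [hp]), PySem.Set.ofList_cons, ih]
      simp only [PySem.Set.discard, List.filter_cons, hp, Bool.false_eq_true, if_false,
        List.filter_filter]
      apply List.filter_congr
      intro y _
      by_cases hy : y = x
      · subst hy; simp [hp]
      · simp [hy]

theorem peel_eq_aux (fuel : Nat) : ∀ (lst : List Int), lst.length ≤ fuel →
    cumulPeel lst
      = (PySem.Set.ofList lst).filter (fun n => decide (PySem.List.count lst n > 1)) := by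
  induction fuel with
  | zero =>
    intro lst hlen
    rw [List.length_eq_zero_iff.1 (Nat.le_zero.1 hlen)]
    simp [cumulPeel]
  | succ m ih =>
    intro lst hlen
    match lst with
    | [] => simp [cumulPeel]
    | hd :: t =>
      rw [cumulPeel]
      set R := t.filter (fun x => !(x == hd)) with hR
      have hRlen : R.length ≤ m := le_trans (List.length_filter_le _ _) (by simpa using hlen)
      rw [PySem.Set.ofList_cons, List.filter_cons]
      have hdisc : (PySem.Set.ofList t).discard hd = PySem.Set.ofList R := by
        rw [hR, ofList_filter]; rfl
      by_cases hmem : hd ∈ t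
      · have hlt : R.length < t.length := by
          apply List.length_filter_lt_length_iff_exists.2
          exact ⟨hd, hmem, by simp⟩
        rw [if_pos hlt]
        have hhd : decide (PySem.List.count (hd :: t) hd > 1) = true := by
          simp only [PySem.List.count, List.count_cons_self, decide_eq_true_eq]
          have := List.count_pos_iff.2 hmem
          omega
        rw [if_pos hhd, ih R hRlen, hdisc]
        congr 1
        apply List.filter_congr
        intro y hy
        have hyR : y ∈ R := (PySem.Set.mem_ofList _ _).1 hy
        have hyne : y ≠ hd := by simpa using List.of_mem_filter hyR
        simp only [PySem.List.count, hR]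
        rw [List.count_filter (by simpa using hyne)]
        simp [Ne.symm hyne]
      · have hReq : R = t := by
          rw [hR]
          apply List.filter_eq_self.2
          intro x hx
          have hne : x ≠ hd := fun h => hmem (h ▸ hx)
          simp [hne]
        have hlt : ¬ R.length < t.length := by rw [hReq]; omega
        rw [if_neg hlt]
        have hhd : ¬ (decide (PySem.List.count (hd :: t) hd > 1) = true) := by
          simp only [PySem.List.count, List.count_cons_self, decide_eq_true_eq]
          have := List.count_eq_zero.2 hmem
          omega
        rw [if_neg hhd, ih R hRlen, hdisc, hReq]
        apply List.filter_congr
        intro y hy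
        have hyt : y ∈ t := (PySem.Set.mem_ofList _ _).1 hy
        have hyne : y ≠ hd := by rintro rfl; exact hmem hyt
        simp [PySem.List.count, Ne.symm hyne]

-- A's loop output is the deduped flattened list filtered by count > 1.
theorem cumulA_eq (lst : List Int) :
    lst.foldl (fun l n => if decide (PySem.List.count lst n > 1) && !(l.contains n) then l ++ [n] else l) []
      = (PySem.Set.ofList lst).filter (fun n => decide (PySem.List.count lst n > 1)) := by
  rw [foldA_eq_foldl_add, ← PySem.Set.ofList_eq_foldl, ofList_filter]

-- ===== VERDICT (by name: the statement is the Claim_ definition above) =====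
theorem cumul_spec : Claim_equal_cumul := by
  intro mandats _
  unfold Spec_cumul cumul cumul_alt
  rw [cumulA_eq, peel_eq_aux (((PySem.Dict.ofList mandats).values.foldl (fun acc v => acc ++ v) []).length) _ le_rfl]
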